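-- pv_equiv track=rewrite | github.com/EcoPoW/BitPoW | tree.py | node_distance
-- ===== SOURCE A (Python) =====
-- def node_distance(a, b):
--     if len(a) > len(b):
--         a, b = b, a
--     i = 0
--     while i < len(a):
--         if a[i] != b[i]:
--             break
--         i += 1
--     return len(a)+len(b)-i*2
-- ===== SOURCE B (Python) =====
-- def node_distance(a, b):
--     lo, hi = 0, min(len(a), len(b))
--     while lo < hi:
--         mid = (lo + hi + 1) // 2
--         if a[:mid] == b[:mid]:
--             lo = mid
--         else:
--             hi = mid - 1
--     return len(a) + len(b) - 2 * lo
-- ===== Notes on version B (the rewrite author's own statement) =====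
-- stated objective: faster
-- what changed: Replaces the element-wise linear scan (after swapping the shorter string first) with a swap-free binary search for the common-prefix length using whole-slice comparisons a[:mid]==b[:mid].
import Mathlib
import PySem

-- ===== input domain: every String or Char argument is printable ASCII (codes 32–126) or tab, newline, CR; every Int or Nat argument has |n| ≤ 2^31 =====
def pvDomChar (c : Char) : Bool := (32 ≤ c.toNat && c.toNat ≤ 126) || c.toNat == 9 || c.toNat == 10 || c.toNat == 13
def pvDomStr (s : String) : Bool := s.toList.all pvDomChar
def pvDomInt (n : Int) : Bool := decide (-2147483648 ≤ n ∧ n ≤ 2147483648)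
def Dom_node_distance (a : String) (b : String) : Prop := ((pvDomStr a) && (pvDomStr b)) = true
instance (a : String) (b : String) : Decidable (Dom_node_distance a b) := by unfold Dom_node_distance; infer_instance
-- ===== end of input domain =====

-- B replaces A's swap-then-linear-scan with a swap-free binary search for the
-- common-prefix length using whole-prefix comparisons, cutting the number of
-- interpreted loop iterations to logarithmic (objective: faster, constant-factor).

-- ===== PORT A =====
-- the while loop of A: advance i while a[i] == b[i]; only called with i ≤ a.length ≤ b.length,
-- so the getD default is never consulted (exact in range)
def ndLoop (a b : List Char) (i : Nat) : Nat :=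
  if i < a.length then
    if a.getD i ' ' ≠ b.getD i ' ' then i else ndLoop a b (i + 1)
  else i
termination_by a.length - i

def node_distance (a : String) (b : String) : Int :=
  let p := if a.toList.length > b.toList.length then (b.toList, a.toList)
           else (a.toList, b.toList)
  (p.1.length : Int) + (p.2.length : Int) - (ndLoop p.1 p.2 0 : Int) * 2

-- ===== PORT B =====
-- binary search: lo is the largest tested k with a[:k] == b[:k]; mid = (lo+hi+1)//2 inlined
def bsLoop (a b : List Char) (lo hi : Nat) : Nat :=
  if lo < hi then
    if a.take ((lo + hi + 1) / 2) = b.take ((lo + hi + 1) / 2) then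
      bsLoop a b ((lo + hi + 1) / 2) hi
    else
      bsLoop a b lo ((lo + hi + 1) / 2 - 1)
  else lo
termination_by hi - lo
decreasing_by all_goals omega

def node_distance_alt (a : String) (b : String) : Int :=
  (a.toList.length : Int) + (b.toList.length : Int)
    - 2 * (bsLoop a.toList b.toList 0 (min a.toList.length b.toList.length) : Int)

-- ===== PRECONDITION & SPEC =====
def Spec_node_distance (a : String) (b : String) (out : Int) : Prop := out = node_distance_alt a b
instance (a : String) (b : String) (out : Int) : Decidable (Spec_node_distance a b out) := by unfold Spec_node_distance; infer_instance

-- ===== CLAIM (what is proved, stated in full; the proofs are below) =====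
def Claim_equal_node_distance : Prop := ∀ (a : String) (b : String), Dom_node_distance a b → Spec_node_distance a b (node_distance a b)

-- ===== LEMMAS AND PROOFS =====

-- canonical common-prefix length
def cpl : List Char → List Char → Nat
  | x :: xs, y :: ys => if x = y then cpl xs ys + 1 else 0
  | _, _ => 0

theorem cpl_le_left : ∀ (a b : List Char), cpl a b ≤ a.length := by
  intro a
  induction a with
  | nil => intro b; simp [cpl]
  | cons x xs ih =>
    intro b
    cases b with
    | nil => simp [cpl]
    | cons y ys =>
      simp only [cpl]
      split
      · simpa using ih ys
      · simp

theorem cpl_le_right : ∀ (a b : List Char), cpl a b ≤ b.length := by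
  intro a
  induction a with
  | nil => intro b; simp [cpl]
  | cons x xs ih =>
    intro b
    cases b with
    | nil => simp [cpl]
    | cons y ys =>
      simp only [cpl]
      split
      · simpa using ih ys
      · simp

theorem cpl_comm : ∀ (a b : List Char), cpl a b = cpl b a := by
  intro a
  induction a with
  | nil => intro b; cases b <;> simp [cpl]
  | cons x xs ih =>
    intro b
    cases b with
    | nil => simp [cpl]
    | cons y ys =>
      by_cases h : x = y
      · subst h; simp [cpl, ih]
      · simp only [cpl, if_neg h, if_neg (Ne.symm h)]

theorem take_eq_iff_cpl : ∀ (a b : List Char) (k : Nat), k ≤ a.length → k ≤ b.length →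
    (a.take k = b.take k ↔ k ≤ cpl a b) := by
  intro a
  induction a with
  | nil =>
    intro b k hk _
    have : k = 0 := by simpa using hk
    subst this; simp
  | cons x xs ih =>
    intro b k hka hkb
    cases k with
    | zero => simp
    | succ k =>
      cases b with
      | nil => simp at hkb
      | cons y ys =>
        by_cases h : x = y
        · subst h
          simp only [List.take_succ_cons, cpl, List.cons.injEq, true_and, if_true]
          rw [ih ys k (by simpa using hka) (by simpa using hkb)]
          omega
        · simp only [List.take_succ_cons, cpl, if_neg h, List.cons.injEq]
          constructor
          · rintro ⟨h', -⟩; exact absurd h' h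
          · omega

-- shifting the index of A's loop past a common head
theorem ndLoop_shift (x y : Char) (a b : List Char) (i : Nat) :
    ndLoop (x :: a) (y :: b) (i + 1) = ndLoop a b i + 1 := by
  conv_lhs => rw [ndLoop]
  conv_rhs => rw [ndLoop]
  simp only [List.length_cons, List.getD_cons_succ]
  by_cases h : i < a.length
  · rw [if_pos (by omega : i + 1 < a.length + 1), if_pos h]
    split
    · rfl
    · exact ndLoop_shift x y a b (i + 1)
  · rw [if_neg (by omega : ¬ i + 1 < a.length + 1), if_neg h]
termination_by a.length - i
decreasing_by omega

theorem ndLoop_eq_cpl : ∀ (a b : List Char), a.length ≤ b.length → ndLoop a b 0 = cpl a b := by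
  intro a
  induction a with
  | nil => intro b _; rw [ndLoop]; simp [cpl]
  | cons x xs ih =>
    intro b hab
    cases b with
    | nil => simp at hab
    | cons y ys =>
      rw [ndLoop]
      simp only [List.length_cons, List.getD_cons_zero]
      rw [if_pos (by omega)]
      by_cases h : x = y
      · subst h
        rw [if_neg (by simp)]
        show ndLoop (x :: xs) (x :: ys) (0 + 1) = _
        rw [ndLoop_shift, ih ys (by simpa using hab), cpl]
        simp
      · rw [if_pos (by simpa using h), cpl, if_neg h]

theorem bsLoop_eq_cpl : ∀ (n : Nat) (a b : List Char) (lo hi : Nat), hi - lo ≤ n →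
    lo ≤ cpl a b → cpl a b ≤ hi → hi ≤ min a.length b.length → bsLoop a b lo hi = cpl a b := by
  intro n
  induction n with
  | zero =>
    intro a b lo hi h1 h2 h3 _
    rw [bsLoop, if_neg (by omega)]
    omega
  | succ n ih =>
    intro a b lo hi h1 h2 h3 h4
    by_cases hlt : lo < hi
    case neg =>
      rw [bsLoop, if_neg hlt]; omega
    case pos =>
      rw [bsLoop, if_pos hlt]
      have hmid1 : lo < (lo + hi + 1) / 2 := by omega
      have hmid2 : (lo + hi + 1) / 2 ≤ hi := by omega
      have htk := take_eq_iff_cpl a b ((lo + hi + 1) / 2) (by omega) (by omega)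
      split
      case isTrue heq =>
        exact ih a b _ hi (by omega) (htk.mp heq) h3 h4
      case isFalse hne =>
        have : ¬ ((lo + hi + 1) / 2 ≤ cpl a b) := fun h => hne (htk.mpr h)
        exact ih a b lo _ (by omega) h2 (by omega) (by omega)

-- ===== VERDICT (by name: the statement is the Claim_ definition above) =====
theorem node_distance_spec : Claim_equal_node_distance := by
  intro a b _
  have hle := cpl_le_left a.toList b.toList
  have hri := cpl_le_right a.toList b.toList
  have hbs : bsLoop a.toList b.toList 0 (min a.toList.length b.toList.length)
      = cpl a.toList b.toList :=
    bsLoop_eq_cpl _ a.toList b.toList 0 _ le_rfl (Nat.zero_le _) (by omega) le_rfl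
  unfold Spec_node_distance node_distance node_distance_alt
  rw [hbs]
  by_cases h : a.toList.length > b.toList.length
  · rw [if_pos h]
    simp only
    rw [ndLoop_eq_cpl b.toList a.toList (by omega), cpl_comm b.toList a.toList]
    ring
  · rw [if_neg h]
    simp only
    rw [ndLoop_eq_cpl a.toList b.toList (by omega)]
    ring
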